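/- GENERATED by farm/mkstatement.py from design/units.tsv (unit `DGifDecompressLine.7`) and the assertions of Gif/Spec/Seg_DGifDecompressLine.lean — do not edit.
   THE STATEMENT of the proof unit `DGifDecompressLine.7`: segment 7 of `DGifDecompressLine` (16 instructions; entries 0x106d06;
   exits 0x106e4b,0x106da7,0x106d47; ranges 0x106d06-0x106d47)
   takes each of its entry assertions to one of its exit assertions (`Gif.Spec.DGifDecompressLine.Seg7`), given the contracts of its callees.
   What the names mean: ProgX/Base/Spec/Basic.lean (the shared hypotheses), Gif/Spec/Seg_DGifDecompressLine.lean (the assertions). The theorem to prove: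
   `theorem DGifDecompressLine_7_ok : Gif.Spec.DGifDecompressLine_7.Statement`. -/
import Gif.Code
import Gif.Dec.All
import Gif.Labels
import Gif.Spec.Seg_DGifDecompressLine
namespace Gif.Spec.DGifDecompressLine_7
open X86 X86.User Asan

/-- The statement of unit `DGifDecompressLine.7`. -/
def Statement : Prop :=
  ∀ (Lay : Layout) (_hLay : Lay.hi = 0x1000000) (μ : Microarch) (_hμ : UserX.MicroOK μ) (u₀ : State)
    (_hcode : HasCodeNat Lay u₀ Gif.L.DGifDecompressLine.entry Gif.Code.code_DGifDecompressLine.nat Gif.L.DGifDecompressLine.size)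
    (_h_asan_load4_noabort : Asan.SmallCheck Lay μ ProgX.Base.WayInv (ProgX.Base.CodeOK u₀) [.rax, .rcx, .rdx] 4 ProgX.Base.L.__asan_load4_noabort.entry),
    Gif.Spec.DGifDecompressLine.Seg7 Lay μ u₀

end Gif.Spec.DGifDecompressLine_7
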